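-- pv_equiv track=rewrite | github.com/guithepc/python-algorithms | sliding_window.py | maximumLenghtSubstring
-- ===== SOURCE A (Python) =====
-- def maximumLenghtSubstring(s: str) -> int:
--     left, right = 0, 0
--     _max = 1
--     counter = {}
--
--     counter[s[0]] = 1
--
--     while right < len(s) -1:
--         right+=1
--         if counter.get(s[right]):
--             counter[s[right]] +=1
--         else:
--             counter[s[right]] = 1
--
--         while counter[s[right]] == 3:
--             counter[s[left]] -=1
--             left+=1
--         _max = max(_max, right-left+1)
--
--     return _max
-- ===== SOURCE B (Python) =====
-- def maximumLenghtSubstring(s: str) -> int: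
--     # For each char remember its last two occurrence indices; when the char two
--     # occurrences ago is still inside the window, jump `left` past it in O(1).
--     prev = {}  # char -> (last index, second-last index or None)
--     left = 0
--     best = 0
--     for right, ch in enumerate(s):
--         p1, p2 = prev.get(ch, (None, None))
--         if p2 is not None and p2 >= left:
--             left = p2 + 1
--         prev[ch] = (right, p1)
--         best = max(best, right - left + 1)
--     return best
-- ===== Notes on version B (the rewrite author's own statement) =====
-- stated objective: faster
-- what changed: Replaces the count dictionary and the inner shrinking while-loop by a dictionary of each character's last two occurrence indices, so `left` jumps directly past the second-last occurrence in O(1) with no inner loop and fewer dict operations per step.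
import Mathlib
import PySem

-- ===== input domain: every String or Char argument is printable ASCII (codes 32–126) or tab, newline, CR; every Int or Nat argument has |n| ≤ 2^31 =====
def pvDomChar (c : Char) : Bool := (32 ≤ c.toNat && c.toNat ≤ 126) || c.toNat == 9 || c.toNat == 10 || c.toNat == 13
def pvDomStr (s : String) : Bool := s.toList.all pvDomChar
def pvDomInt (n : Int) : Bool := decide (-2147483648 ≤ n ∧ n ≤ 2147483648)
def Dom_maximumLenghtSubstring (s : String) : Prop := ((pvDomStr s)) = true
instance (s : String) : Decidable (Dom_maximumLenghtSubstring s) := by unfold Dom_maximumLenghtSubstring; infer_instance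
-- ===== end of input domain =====

-- B replaces A's count dict + inner shrinking while-loop by a dict of each char's
-- last two occurrence indices, jumping `left` past the second-last occurrence in O(1).


-- ===== PORT A =====
-- inner `while counter[s[right]] == 3: counter[s[left]] -= 1; left += 1`;
-- fuel-bounded recursion (fuel = cs.length always suffices on the states A reaches;
-- `cs.getD left ' '` is exact: `left` stays in range wherever Python does not raise).
def pvAInner (cs : List Char) (c : Char) : Nat → Nat → PySem.Dict Char Int → Nat × PySem.Dict Char Int
  | 0, left, cnt => (left, cnt)
  | fuel+1, left, cnt =>
      if cnt.getD c 0 = 3 then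
        pvAInner cs c fuel (left+1)
          (cnt.insert (cs.getD left ' ') (cnt.getD (cs.getD left ' ') 0 - 1))
      else (left, cnt)

-- outer `while right < len(s)-1`; fuel = (len s - 1) - right; `counter.get(s[right])`
-- truthiness = (getD _ 0 ≠ 0) since absent and 0 are both falsy.
def pvAOuter (cs : List Char) : Nat → Nat → Nat → Int → PySem.Dict Char Int → Int
  | 0, _, _, mx, _ => mx
  | fuel+1, left, right, mx, cnt =>
      let r := right + 1
      let c := cs.getD r ' '
      let cnt1 := if cnt.getD c 0 ≠ 0 then cnt.insert c (cnt.getD c 0 + 1) else cnt.insert c 1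
      let p := pvAInner cs c cs.length left cnt1
      pvAOuter cs fuel p.1 r (max mx ((r : Int) - (p.1 : Int) + 1)) p.2

def maximumLenghtSubstring (s : String) : Int :=
  match s.toList with
  | [] => 0   -- Python raises IndexError at `counter[s[0]]`; excluded by Pre_
  | c0 :: rest => pvAOuter (c0 :: rest) ((c0 :: rest).length - 1) 0 0 1 (PySem.Dict.empty.insert c0 1)

-- ===== PORT B =====
def pvBLoop : Nat → Nat → Int → PySem.Dict Char (Option Nat × Option Nat) → List Char → Int
  | _, _, best, _, [] => best
  | r, left, best, prev, c :: rest =>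
      let p := prev.getD c (none, none)
      let left' := match p.2 with
                   | some q => if left ≤ q then q + 1 else left
                   | none => left
      pvBLoop (r+1) left' (max best ((r : Int) - (left' : Int) + 1)) (prev.insert c (some r, p.1)) rest

def maximumLenghtSubstring_alt (s : String) : Int :=
  pvBLoop 0 0 0 PySem.Dict.empty s.toList

-- ===== PRECONDITION & SPEC =====
-- Pre_ excludes exactly the empty string, on which A raises IndexError at `counter[s[0]]`
-- (B naturally returns 0 there).
def Pre_maximumLenghtSubstring (s : String) : Prop := s ≠ ""
instance (s : String) : Decidable (Pre_maximumLenghtSubstring s) := by unfold Pre_maximumLenghtSubstring; infer_instance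
def pvWitness_maximumLenghtSubstring : String := "abcabc"

def Spec_maximumLenghtSubstring (s : String) (out : Int) : Prop := out = maximumLenghtSubstring_alt s
instance (s : String) (out : Int) : Decidable (Spec_maximumLenghtSubstring s out) := by unfold Spec_maximumLenghtSubstring; infer_instance

-- ===== CLAIM (what is proved, stated in full; the proofs are below) =====
def Claim_equal_maximumLenghtSubstring : Prop := ∀ (s : String), Dom_maximumLenghtSubstring s → Pre_maximumLenghtSubstring s → Spec_maximumLenghtSubstring s (maximumLenghtSubstring s)

-- ===== LEMMAS AND PROOFS =====

-- number of occurrences of c in the window s[l..r] (inclusive)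
def Cnt (cs : List Char) (l r : Nat) (c : Char) : Nat := ((cs.take (r+1)).drop l).count c

-- A's count dict holds the window counts
def CntInv (cs : List Char) (l r : Nat) (cnt : PySem.Dict Char Int) : Prop :=
  ∀ c : Char, cnt.getD c 0 = (Cnt cs l r c : Int)

-- B's dict holds each char's last two occurrence indices in s[0..r]
def PrevInv (cs : List Char) (r : Nat) (prev : PySem.Dict Char (Option Nat × Option Nat)) : Prop :=
  ∀ c : Char,
    match prev.get? c with
    | none => Cnt cs 0 r c = 0
    | some (some p1, none) =>
        p1 ≤ r ∧ cs.getD p1 ' ' = c ∧ Cnt cs 0 r c = 1 ∧ Cnt cs (p1+1) r c = 0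
    | some (some p1, some p2) =>
        p2 < p1 ∧ p1 ≤ r ∧ cs.getD p1 ' ' = c ∧ cs.getD p2 ' ' = c ∧
        Cnt cs (p1+1) r c = 0 ∧ Cnt cs (p2+1) r c = 1
    | some (none, _) => False

theorem cnt_zero_of_ge (cs : List Char) (l r : Nat) (c : Char) (h : r + 1 ≤ l) :
    Cnt cs l r c = 0 := by
  unfold Cnt
  rw [List.drop_eq_nil_of_le (by simpa using le_trans (List.length_take_le _ _) h)]
  rfl

theorem cnt_cons (cs : List Char) (l r : Nat) (hlr : l ≤ r) (hlen : l < cs.length) :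
    (cs.take (r+1)).drop l = cs.getD l ' ' :: (cs.take (r+1)).drop (l+1) := by
  have h : l < (cs.take (r+1)).length := by simp [List.length_take]; omega
  rw [List.drop_eq_getElem_cons h]
  congr 1
  rw [List.getElem_take]
  rw [List.getD_eq_getElem _ _ hlen]

theorem cnt_succ (cs : List Char) (l r : Nat) (c : Char) (hr : r + 1 < cs.length) (hl : l ≤ r + 1) :
    Cnt cs l (r+1) c = Cnt cs l r c + (if cs.getD (r+1) ' ' = c then 1 else 0) := by
  unfold Cnt
  have ht : cs.take (r+1+1) = cs.take (r+1) ++ [cs.getD (r+1) ' '] := by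
    rw [List.take_add_one]
    congr 1
    rw [List.getElem?_eq_getElem hr, List.getD_eq_getElem _ _ hr]
    rfl
  rw [ht, List.drop_append_of_le_length (by simp [List.length_take]; omega), List.count_append]
  congr 1
  by_cases h : cs.getD (r+1) ' ' = c <;> simp [List.count_singleton, h, beq_iff_eq]

theorem cnt_mono (cs : List Char) (l l' r : Nat) (c : Char) (h : l ≤ l') :
    Cnt cs l' r c ≤ Cnt cs l r c := by
  unfold Cnt
  have : (cs.take (r+1)).drop l' = ((cs.take (r+1)).drop l).drop (l' - l) := by
    rw [List.drop_drop]; congr 1; omega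
  rw [this]
  exact (List.drop_sublist _ _).count_le c

theorem cnt_step (cs : List Char) (l r : Nat) (c : Char) (hlr : l ≤ r) (hlen : l < cs.length) :
    Cnt cs l r c = Cnt cs (l+1) r c + (if cs.getD l ' ' = c then 1 else 0) := by
  unfold Cnt
  rw [cnt_cons cs l r hlr hlen, List.count_cons]
  by_cases h : cs.getD l ' ' = c <;> simp [h, beq_iff_eq]

theorem cnt_ge (cs : List Char) (l p r : Nat) (c : Char) (hp : p < cs.length) (hpr : p ≤ r)
    (hc : cs.getD p ' ' = c) (hl : l ≤ p) :
    1 + Cnt cs (p+1) r c ≤ Cnt cs l r c := by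
  have h1 := cnt_step cs p r c hpr hp
  rw [hc] at h1
  simp at h1
  have := cnt_mono cs l p r c hl
  omega

theorem inner_main (cs : List Char) (r p2 : Nat) (c : Char) :
    ∀ (d l fuel : Nat) (cnt : PySem.Dict Char Int),
    l + d = p2 + 1 →
    d + 1 ≤ fuel →
    p2 + 1 ≤ r → r < cs.length →
    CntInv cs l r cnt →
    (∀ j, l ≤ j → j ≤ p2 → Cnt cs j r c = 3) →
    Cnt cs (p2+1) r c = 2 →
    ∃ cnt', pvAInner cs c fuel l cnt = (p2 + 1, cnt') ∧ CntInv cs (p2+1) r cnt' := by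
  intro d
  induction d with
  | zero =>
    intro l fuel cnt hd hf hp2r hr hcnt h3 h2
    obtain ⟨f, rfl⟩ : ∃ f, fuel = f + 1 := ⟨fuel - 1, by omega⟩
    have hl : l = p2 + 1 := by omega
    subst hl
    refine ⟨cnt, ?_, hcnt⟩
    unfold pvAInner
    rw [if_neg (by rw [hcnt c, h2]; norm_num)]
  | succ d ih =>
    intro l fuel cnt hd hf hp2r hr hcnt h3 h2
    obtain ⟨f, rfl⟩ : ∃ f, fuel = f + 1 := ⟨fuel - 1, by omega⟩
    have hl : l ≤ p2 := by omega
    have h3l : Cnt cs l r c = 3 := h3 l le_rfl hl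
    unfold pvAInner
    rw [if_pos (by rw [hcnt c, h3l]; norm_num)]
    apply ih (l+1) f _ (by omega) (by omega) hp2r hr ?_
      (fun j hj1 hj2 => h3 j (by omega) hj2) h2
    intro c'
    by_cases hx : c' = cs.getD l ' '
    · rw [hx, PySem.Dict.getD_insert_self, hcnt (cs.getD l ' ')]
      have hst := cnt_step cs l r (cs.getD l ' ') (by omega) (by omega)
      rw [if_pos rfl] at hst
      push_cast
      omega
    · rw [PySem.Dict.getD_insert_of_ne _ _ _ hx, hcnt c']
      have hst := cnt_step cs l r c' (by omega) (by omega)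
      rw [if_neg (fun h => hx h.symm)] at hst
      push_cast
      omega

theorem previnv_step (cs : List Char) (r : Nat) (prev : PySem.Dict Char (Option Nat × Option Nat))
    (c : Char) (hr : r + 1 < cs.length) (hc : cs.getD (r+1) ' ' = c) (h : PrevInv cs r prev) :
    PrevInv cs (r+1) (prev.insert c (some (r+1), (prev.getD c (none, none)).1)) := by
  intro c'
  unfold PrevInv at h
  by_cases hcc : c' = c
  · subst hcc
    have hc0 := h c'
    rw [PySem.Dict.get?_insert_self, PySem.Dict.getD_eq_get?_getD]
    rcases hp : prev.get? c' with _ | ⟨_ | p1, _ | p2⟩ <;> rw [hp] at hc0 <;> dsimp only [Option.getD] at hc0 ⊢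
    · refine ⟨le_rfl, hc, ?_, ?_⟩
      · rw [cnt_succ cs 0 r c' hr (by omega), if_pos hc, hc0]
      · exact cnt_zero_of_ge cs (r+2) (r+1) c' (by omega)
    · obtain ⟨h1, h2, h3, h4⟩ := hc0
      refine ⟨by omega, le_rfl, hc, h2, cnt_zero_of_ge cs (r+2) (r+1) c' (by omega), ?_⟩
      rw [cnt_succ cs (p1+1) r c' hr (by omega), if_pos hc, h4]
    · obtain ⟨h1, h2, h3, h4, h5, h6⟩ := hc0
      refine ⟨by omega, le_rfl, hc, h3, cnt_zero_of_ge cs (r+2) (r+1) c' (by omega), ?_⟩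
      rw [cnt_succ cs (p1+1) r c' hr (by omega), if_pos hc, h5]
  · have hc0 := h c'
    have hne : cs.getD (r+1) ' ' ≠ c' := by rw [hc]; exact fun h => hcc h.symm
    rw [PySem.Dict.get?_insert_of_ne _ _ hcc]
    rcases hp : prev.get? c' with _ | ⟨_ | p1, _ | p2⟩ <;> rw [hp] at hc0 <;> dsimp only [Option.getD] at hc0 ⊢
    · rw [cnt_succ cs 0 r c' hr (by omega), if_neg hne, hc0]
    · obtain ⟨h1, h2, h3, h4⟩ := hc0
      refine ⟨by omega, h2, ?_, ?_⟩
      · rw [cnt_succ cs 0 r c' hr (by omega), if_neg hne, h3]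
      · rw [cnt_succ cs (p1+1) r c' hr (by omega), if_neg hne, h4]
    · obtain ⟨h1, h2, h3, h4, h5, h6⟩ := hc0
      refine ⟨h1, by omega, h3, h4, ?_, ?_⟩
      · rw [cnt_succ cs (p1+1) r c' hr (by omega), if_neg hne, h5]
      · rw [cnt_succ cs (p2+1) r c' hr (by omega), if_neg hne, h6]

theorem loops_eq (cs : List Char) :
    ∀ (k right left : Nat) (mx : Int) (cnt : PySem.Dict Char Int)
      (prev : PySem.Dict Char (Option Nat × Option Nat)),
    right + 1 + k = cs.length →
    left ≤ right →
    CntInv cs left right cnt →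
    (∀ c, Cnt cs left right c ≤ 2) →
    PrevInv cs right prev →
    pvAOuter cs k left right mx cnt = pvBLoop (right+1) left mx prev (cs.drop (right+1)) := by
  intro k
  induction k with
  | zero =>
    intro right left mx cnt prev hk hlr hcnt hval hprev
    rw [List.drop_eq_nil_of_le (by omega)]
    rfl
  | succ k ih =>
    intro right left mx cnt prev hk hlr hcnt hval hprev
    have hrlen : right + 1 < cs.length := by omega
    have hdrop : cs.drop (right+1) = cs.getD (right+1) ' ' :: cs.drop (right+1+1) := by
      rw [List.drop_eq_getElem_cons hrlen]
      congr 1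
      exact (List.getD_eq_getElem cs ' ' hrlen).symm
    rw [hdrop]
    set c := cs.getD (right+1) ' ' with hcdef
    have hm := hcnt c
    have hm2 : Cnt cs left right c ≤ 2 := hval c
    -- the updated counter is an insert of the old window count + 1 in both branches
    have hcnt1 : (if cnt.getD c 0 ≠ 0 then cnt.insert c (cnt.getD c 0 + 1) else cnt.insert c 1)
        = cnt.insert c ((Cnt cs left right c : Int) + 1) := by
      by_cases h0 : Cnt cs left right c = 0
      · rw [if_neg (by rw [hm, h0]; norm_num), h0]
        norm_num
      · rw [if_pos (by rw [hm]; exact_mod_cast h0), hm]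
    have hcnt1inv : CntInv cs left (right+1) (cnt.insert c ((Cnt cs left right c : Int) + 1)) := by
      intro c''
      by_cases hx : c'' = c
      · rw [hx, PySem.Dict.getD_insert_self,
          cnt_succ cs left right c hrlen (by omega), if_pos hcdef.symm]
        push_cast; omega
      · rw [PySem.Dict.getD_insert_of_ne _ _ _ hx, hcnt c'',
          cnt_succ cs left right c'' hrlen (by omega), if_neg (fun h => hx (h.symm.trans hcdef.symm))]
        push_cast; omega
    have hprev' : PrevInv cs (right+1) (prev.insert c (some (right+1), (prev.getD c (none, none)).1)) :=
      previnv_step cs right prev c hrlen rfl hprev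
    simp only [pvAOuter, pvBLoop]
    rw [← hcdef, hcnt1]
    by_cases hcase : Cnt cs left right c = 2
    · -- the window now holds three copies of c: A shrinks to p2+1, B jumps there
      have hpc := hprev c
      rcases hp : prev.get? c with _ | ⟨_ | p1, _ | p2⟩ <;> rw [hp] at hpc <;>
        dsimp only [Option.getD] at hpc
      · have := cnt_mono cs 0 left right c (by omega)
        omega
      · obtain ⟨h1, h2, h3, h4⟩ := hpc
        have := cnt_mono cs 0 left right c (by omega)
        omega
      · obtain ⟨h1, h2, h3, h4, h5, h6⟩ := hpc
        have hlp2 : left ≤ p2 := by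
          by_contra hcon
          have := cnt_mono cs (p2+1) left right c (by omega)
          omega
        have hp2len : p2 < cs.length := by omega
        have h3j : ∀ j, left ≤ j → j ≤ p2 → Cnt cs j (right+1) c = 3 := by
          intro j hj1 hj2
          rw [cnt_succ cs j right c hrlen (by omega), if_pos hcdef.symm]
          have hge := cnt_ge cs j p2 right c hp2len (by omega) h4 hj2
          have hle := cnt_mono cs left j right c hj1
          omega
        have hstop : Cnt cs (p2+1) (right+1) c = 2 := by
          rw [cnt_succ cs (p2+1) right c hrlen (by omega), if_pos hcdef.symm, h6]
        obtain ⟨cnt2, hinner, hcnt2⟩ :=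
          inner_main cs (right+1) p2 c (p2 + 1 - left) left cs.length
            (cnt.insert c ((Cnt cs left right c : Int) + 1))
            (by omega) (by omega) (by omega) hrlen hcnt1inv h3j hstop
        rw [hinner]
        have hgd : prev.getD c (none, none) = (some p1, some p2) := by
          rw [PySem.Dict.getD_eq_get?_getD, hp]; rfl
        rw [hgd]
        dsimp only
        rw [if_pos hlp2]
        rw [hgd] at hprev'
        apply ih (right+1) (p2+1) _ cnt2 _ (by omega) (by omega) hcnt2 ?_ hprev'
        intro c''
        by_cases hx : c'' = c
        · subst hx; omega
        · have := cnt_mono cs left (p2+1) (right+1) c'' (by omega)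
          have hss := cnt_succ cs left right c'' hrlen (by omega)
          rw [if_neg (fun h => hx (h.symm.trans hcdef.symm))] at hss
          have := hval c''
          omega
    · -- fewer than three copies of c: A's inner loop exits at once, B does not move left
      have hcondv : (cnt.insert c ((Cnt cs left right c : Int) + 1)).getD c 0 ≠ 3 := by
        rw [hcnt1inv c, cnt_succ cs left right c hrlen (by omega), if_pos hcdef.symm]
        push_cast; omega
      have hnot3 : pvAInner cs c cs.length left (cnt.insert c ((Cnt cs left right c : Int) + 1))
          = (left, cnt.insert c ((Cnt cs left right c : Int) + 1)) := by
        obtain ⟨f, hf⟩ : ∃ f, cs.length = f + 1 := ⟨cs.length - 1, by omega⟩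
        rw [hf]
        unfold pvAInner
        rw [if_neg hcondv]
      rw [hnot3]
      have hbleft : (match (prev.getD c (none, none)).2 with
          | some q => if left ≤ q then q + 1 else left
          | none => left) = left := by
        have hpc := hprev c
        rcases hp : prev.get? c with _ | ⟨_ | p1, _ | p2⟩ <;> rw [hp] at hpc <;>
          dsimp only [Option.getD] at hpc <;>
          rw [PySem.Dict.getD_eq_get?_getD, hp] <;> dsimp only [Option.getD]
        · obtain ⟨h1, h2, h3, h4, h5, h6⟩ := hpc
          rw [if_neg ?_]
          intro hcon
          have hge := cnt_ge cs left p2 right c (by omega) (by omega) h4 hcon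
          omega
      rw [hbleft]
      apply ih (right+1) left _ _ _ (by omega) (by omega) hcnt1inv ?_ hprev'
      intro c''
      by_cases hx : c'' = c
      · rw [hx, cnt_succ cs left right c hrlen (by omega), if_pos hcdef.symm]
        omega
      · have hss := cnt_succ cs left right c'' hrlen (by omega)
        rw [if_neg (fun h => hx (h.symm.trans hcdef.symm))] at hss
        have := hval c''
        omega

-- ===== VERDICT (by name: the statement is the Claim_ definition above) =====
theorem init_cnt (c0 : Char) (rest : List Char) :
    CntInv (c0 :: rest) 0 0 (PySem.Dict.empty.insert c0 1) := by
  intro c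
  rw [PySem.Dict.getD_insert]
  unfold Cnt
  simp only [List.take, List.drop]
  by_cases hx : c = c0
  · subst hx
    simp [List.count_cons, PySem.Dict.getD_empty]
  · simp [hx, PySem.Dict.getD_empty, List.count_singleton, beq_iff_eq]
    exact fun h : c0 = c => hx h.symm

theorem init_prev (c0 : Char) (rest : List Char) :
    PrevInv (c0 :: rest) 0 (PySem.Dict.empty.insert c0 (some 0, none)) := by
  intro c
  by_cases hx : c = c0
  · subst hx
    rw [PySem.Dict.get?_insert_self]
    refine ⟨le_rfl, rfl, ?_, cnt_zero_of_ge _ 1 0 _ le_rfl⟩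
    unfold Cnt
    simp [List.count_cons]
  · rw [PySem.Dict.get?_insert_of_ne _ _ hx, PySem.Dict.get?_empty]
    unfold Cnt
    simp only [List.drop, List.take, List.count_cons, List.count_nil]
    simp
    exact fun h : c0 = c => hx h.symm

theorem maximumLenghtSubstring_spec : Claim_equal_maximumLenghtSubstring := by
  intro s _ hpre
  unfold Spec_maximumLenghtSubstring maximumLenghtSubstring maximumLenghtSubstring_alt
  rcases hsl : s.toList with _ | ⟨c0, rest⟩
  · exact absurd (by rwa [← String.toList_eq_nil_iff]) hpre
  · have hB : pvBLoop 0 0 0 PySem.Dict.empty (c0 :: rest)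
        = pvBLoop 1 0 1 (PySem.Dict.empty.insert c0 (some 0, none)) rest := by
      simp only [pvBLoop, PySem.Dict.getD_empty]
      norm_num
    rw [hB]
    have hA := loops_eq (c0 :: rest) rest.length 0 0 1
      (PySem.Dict.empty.insert c0 1) (PySem.Dict.empty.insert c0 (some 0, none))
      (by simp; omega) (le_refl 0) (init_cnt c0 rest)
      (fun c => by
        unfold Cnt
        simp only [List.take, List.drop]
        by_cases hx : c0 = c <;> simp [List.count_cons, hx])
      (init_prev c0 rest)
    simpa using hA
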